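-- pv_equiv track=rewrite | github.com/AsilbekMelikov/advent-code | 2-day/index.py | calculate_safe
-- ===== SOURCE A (Python) =====
-- def find_status(diff):
--     if diff > 0:
--         return 'inc'
--     else:
--         return'dec'
--
-- def calculate_safe(source):
--     safe_ones = 0
--     for arr in source:
--         status = find_status(arr[1] - arr[0])
--         for i in range(1, len(arr)):
--             diff = arr[i] - arr[i-1]
--             status2 = find_status(diff)
--             if status != status2 or diff < -3 or diff == 0 or diff > 3:
--                 break
--         else:
--             safe_ones += 1
--     return safe_ones
-- ===== SOURCE B (Python) =====
-- def calculate_safe(source):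
--     count = 0
--     for arr in source:
--         diffs = [arr[i] - arr[i - 1] for i in range(1, len(arr))]
--         if all(1 <= d <= 3 for d in diffs) or all(-3 <= d <= -1 for d in diffs):
--             count += 1
--     return count
-- ===== Notes on version B (the rewrite author's own statement) =====
-- stated objective: simpler
-- what changed: B drops the find_status/status/break state machine and judges each array globally: build the diffs list once and count the array when all diffs lie in [1,3] or all in [-3,-1].
-- crash fix: A raises IndexError on any array of length < 2 (it reads arr[1]); B returns a value there, counting such arrays as safe (both all() conditions hold vacuously). — e.g. on calculate_safe([[1], [1, 2]]): A raises IndexError, B returns 2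
import Mathlib
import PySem

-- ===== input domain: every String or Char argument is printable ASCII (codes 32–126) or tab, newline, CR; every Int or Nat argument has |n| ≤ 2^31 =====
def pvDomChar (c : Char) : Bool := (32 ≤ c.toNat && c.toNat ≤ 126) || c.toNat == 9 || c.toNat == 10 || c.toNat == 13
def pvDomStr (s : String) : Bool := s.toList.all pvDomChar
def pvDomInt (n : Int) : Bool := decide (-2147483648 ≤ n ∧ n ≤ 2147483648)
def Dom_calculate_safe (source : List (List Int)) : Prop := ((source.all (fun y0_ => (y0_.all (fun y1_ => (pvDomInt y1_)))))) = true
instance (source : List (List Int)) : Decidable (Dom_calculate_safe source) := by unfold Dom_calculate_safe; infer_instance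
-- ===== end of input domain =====

-- B replaces A's status/break state machine by a global test on the diffs list (objective: simpler).

-- ===== PORT A =====
def find_status (diff : Int) : String := if diff > 0 then "inc" else "dec"

-- inner for-loop of A: returns true iff the loop completes without break (the for-else fires)
def pvLoopA (arr : List Int) (status : String) : List Nat → Bool
  | [] => true
  | i :: rest =>
      let diff := arr.getD i 0 - arr.getD (i - 1) 0
      let status2 := find_status diff
      if status ≠ status2 ∨ diff < -3 ∨ diff = 0 ∨ diff > 3 then false
      else pvLoopA arr status rest

def calculate_safe (source : List (List Int)) : Int :=
  source.foldl (fun safe_ones arr =>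
    let status := find_status (arr.getD 1 0 - arr.getD 0 0)
    if pvLoopA arr status (List.range' 1 (arr.length - 1)) then safe_ones + 1 else safe_ones) 0

-- ===== PORT B =====
def calculate_safe_alt (source : List (List Int)) : Int :=
  source.foldl (fun count arr =>
    let diffs := (List.range' 1 (arr.length - 1)).map (fun i => arr.getD i 0 - arr.getD (i - 1) 0)
    if diffs.all (fun d => decide (1 ≤ d ∧ d ≤ 3)) || diffs.all (fun d => decide (-3 ≤ d ∧ d ≤ -1))
    then count + 1 else count) 0

-- ===== PRECONDITION & SPEC =====
-- Pre_ excludes exactly the inputs on which A raises IndexError (an array with fewer than 2 elements).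
def Pre_calculate_safe (source : List (List Int)) : Prop :=
  ∀ arr ∈ source, 2 ≤ arr.length
instance (source : List (List Int)) : Decidable (Pre_calculate_safe source) := by
  unfold Pre_calculate_safe; infer_instance

def pvWitness_calculate_safe : List (List Int) := [[1, 2, 4], [5, 1, 0]]

-- A raises IndexError on any source containing an array of length < 2; B returns a count treating such arrays as safe (both all() tests hold vacuously).
def Raises_calculate_safe (source : List (List Int)) : Prop :=
  ∃ arr ∈ source, arr.length < 2
instance (source : List (List Int)) : Decidable (Raises_calculate_safe source) := by
  unfold Raises_calculate_safe; infer_instance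

def pvRaiseWitness_calculate_safe : List (List Int) := [[1], [1, 2]]
def pvRaiseWitnessOut_calculate_safe : Int := 2

def Spec_calculate_safe (source : List (List Int)) (out : Int) : Prop := out = calculate_safe_alt source
instance (source : List (List Int)) (out : Int) : Decidable (Spec_calculate_safe source out) := by unfold Spec_calculate_safe; infer_instance

-- ===== CLAIM (what is proved, stated in full; the proofs are below) =====
def Claim_equal_calculate_safe : Prop := ∀ (source : List (List Int)), Dom_calculate_safe source → Pre_calculate_safe source → Spec_calculate_safe source (calculate_safe source)

def Claim_raises_calculate_safe : Prop :=
  (∀ (source : List (List Int)), Dom_calculate_safe source → Raises_calculate_safe source → ¬ Pre_calculate_safe source) ∧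
  (Dom_calculate_safe (pvRaiseWitness_calculate_safe) ∧ Raises_calculate_safe (pvRaiseWitness_calculate_safe) ∧ calculate_safe_alt (pvRaiseWitness_calculate_safe) = pvRaiseWitnessOut_calculate_safe)

-- ===== LEMMAS AND PROOFS =====

-- A's break-loop equals an `all` over the index list
theorem pvLoopA_eq_all (arr : List Int) (status : String) (l : List Nat) :
    pvLoopA arr status l =
      l.all (fun i =>
        let diff := arr.getD i 0 - arr.getD (i - 1) 0
        !decide (status ≠ find_status diff ∨ diff < -3 ∨ diff = 0 ∨ diff > 3)) := by
  induction l with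
  | nil => rfl
  | cons i rest ih =>
      simp only [pvLoopA, List.all_cons, ih]
      split_ifs with h
      · rw [decide_eq_true h]
        simp only [Bool.not_true, Bool.false_and]
      · rw [decide_eq_false h]
        simp only [Bool.not_false, Bool.true_and]

-- per-array agreement of the two safety tests, given length ≥ 2
theorem arr_safe_eq (arr : List Int) (h : 2 ≤ arr.length) :
    pvLoopA arr (find_status (arr.getD 1 0 - arr.getD 0 0)) (List.range' 1 (arr.length - 1))
      = (((List.range' 1 (arr.length - 1)).map (fun i => arr.getD i 0 - arr.getD (i - 1) 0)).all
            (fun d => decide (1 ≤ d ∧ d ≤ 3))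
         || ((List.range' 1 (arr.length - 1)).map (fun i => arr.getD i 0 - arr.getD (i - 1) 0)).all
            (fun d => decide (-3 ≤ d ∧ d ≤ -1))) := by
  have h1 : (1 : ℕ) ∈ List.range' 1 (arr.length - 1) := by
    rw [List.mem_range'_1]; omega
  rw [pvLoopA_eq_all]
  simp only [List.all_map, Function.comp_def]
  by_cases hd : arr.getD 1 0 - arr.getD 0 0 > 0
  · -- status = "inc"
    have hs : find_status (arr.getD 1 0 - arr.getD 0 0) = "inc" := by
      unfold find_status; exact if_pos hd
    rw [hs]
    have hgood : ∀ i : ℕ,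
        (!decide ("inc" ≠ find_status (arr.getD i 0 - arr.getD (i - 1) 0) ∨
            arr.getD i 0 - arr.getD (i - 1) 0 < -3 ∨
            arr.getD i 0 - arr.getD (i - 1) 0 = 0 ∨ arr.getD i 0 - arr.getD (i - 1) 0 > 3))
          = decide (1 ≤ arr.getD i 0 - arr.getD (i - 1) 0 ∧ arr.getD i 0 - arr.getD (i - 1) 0 ≤ 3) := by
      intro i
      by_cases hp : arr.getD i 0 - arr.getD (i - 1) 0 > 0
      · have hst : find_status (arr.getD i 0 - arr.getD (i - 1) 0) = "inc" := by
          unfold find_status; exact if_pos hp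
        rw [hst, Bool.eq_iff_iff]; simp [List.getD] at hp ⊢; omega
      · have hst : find_status (arr.getD i 0 - arr.getD (i - 1) 0) = "dec" := by
          unfold find_status; exact if_neg hp
        rw [hst, Bool.eq_iff_iff]; simp [List.getD] at hp ⊢; omega
    simp only [hgood]
    by_cases hall : (List.range' 1 (arr.length - 1)).all
        (fun i => decide (1 ≤ arr.getD i 0 - arr.getD (i - 1) 0 ∧ arr.getD i 0 - arr.getD (i - 1) 0 ≤ 3)) = true
    · rw [hall, Bool.true_or]
    · have hdec : ¬ ((List.range' 1 (arr.length - 1)).all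
          (fun i => decide (-3 ≤ arr.getD i 0 - arr.getD (i - 1) 0 ∧ arr.getD i 0 - arr.getD (i - 1) 0 ≤ -1)) = true) := by
        intro hc
        have := (List.all_eq_true.mp hc) 1 h1
        simp [List.getD] at this hd
        omega
      simp only [Bool.eq_false_iff.mpr hall, Bool.eq_false_iff.mpr hdec]
      rfl
  · -- status = "dec"
    have hs : find_status (arr.getD 1 0 - arr.getD 0 0) = "dec" := by
      unfold find_status; exact if_neg hd
    rw [hs]
    have hgood : ∀ i : ℕ,
        (!decide ("dec" ≠ find_status (arr.getD i 0 - arr.getD (i - 1) 0) ∨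
            arr.getD i 0 - arr.getD (i - 1) 0 < -3 ∨
            arr.getD i 0 - arr.getD (i - 1) 0 = 0 ∨ arr.getD i 0 - arr.getD (i - 1) 0 > 3))
          = decide (-3 ≤ arr.getD i 0 - arr.getD (i - 1) 0 ∧ arr.getD i 0 - arr.getD (i - 1) 0 ≤ -1) := by
      intro i
      by_cases hp : arr.getD i 0 - arr.getD (i - 1) 0 > 0
      · have hst : find_status (arr.getD i 0 - arr.getD (i - 1) 0) = "inc" := by
          unfold find_status; exact if_pos hp
        rw [hst, Bool.eq_iff_iff]; simp [List.getD] at hp ⊢; omega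
      · have hst : find_status (arr.getD i 0 - arr.getD (i - 1) 0) = "dec" := by
          unfold find_status; exact if_neg hp
        rw [hst, Bool.eq_iff_iff]; simp [List.getD] at hp ⊢; omega
    simp only [hgood]
    by_cases hall : (List.range' 1 (arr.length - 1)).all
        (fun i => decide (-3 ≤ arr.getD i 0 - arr.getD (i - 1) 0 ∧ arr.getD i 0 - arr.getD (i - 1) 0 ≤ -1)) = true
    · rw [hall, Bool.or_true]
    · have hinc : ¬ ((List.range' 1 (arr.length - 1)).all
          (fun i => decide (1 ≤ arr.getD i 0 - arr.getD (i - 1) 0 ∧ arr.getD i 0 - arr.getD (i - 1) 0 ≤ 3)) = true) := by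
        intro hc
        have := (List.all_eq_true.mp hc) 1 h1
        simp [List.getD] at this hd
        omega
      simp only [Bool.eq_false_iff.mpr hall, Bool.eq_false_iff.mpr hinc]
      rfl

theorem fold_eq (source : List (List Int)) (h : ∀ arr ∈ source, 2 ≤ arr.length) :
    ∀ acc : Int,
    source.foldl (fun safe_ones arr =>
      let status := find_status (arr.getD 1 0 - arr.getD 0 0)
      if pvLoopA arr status (List.range' 1 (arr.length - 1)) then safe_ones + 1 else safe_ones) acc
    = source.foldl (fun count arr =>
      let diffs := (List.range' 1 (arr.length - 1)).map (fun i => arr.getD i 0 - arr.getD (i - 1) 0)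
      if diffs.all (fun d => decide (1 ≤ d ∧ d ≤ 3)) || diffs.all (fun d => decide (-3 ≤ d ∧ d ≤ -1))
      then count + 1 else count) acc := by
  induction source with
  | nil => intro acc; rfl
  | cons arr rest ih =>
      intro acc
      have harr : 2 ≤ arr.length := h arr (by simp)
      simp only [List.foldl_cons]
      rw [ih (fun a ha => h a (by simp [ha]))]
      congr 1
      simp only [arr_safe_eq arr harr]

-- ===== VERDICT (by name: the statement is the Claim_ definition above) =====
theorem calculate_safe_spec : Claim_equal_calculate_safe := by
  intro source _ hpre
  unfold Spec_calculate_safe calculate_safe calculate_safe_alt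
  exact fold_eq source hpre 0

@[simp] theorem calculate_safe_raises : Claim_raises_calculate_safe := by
  unfold Claim_raises_calculate_safe
  constructor
  · intro source _ ⟨arr, hm, hl⟩ hpre
    exact absurd (hpre arr hm) (by omega)
  · exact ⟨by decide, by decide, by decide⟩
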